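-- pv_equiv track=rewrite | github.com/dme2Sapphire/AOC_2025 | d9.py | tmpvalid
-- ===== SOURCE A (Python) =====
-- def linedef(coord1, coord2):
--     xe = (coord1[0] == coord2[0])
--     ye = (coord1[1] == coord2[1])
--     if xe:
--         return [0, coord1[0], coord1[1], coord2[1]]
--     elif ye:
--         return [1, coord1[1], coord1[0], coord2[0]]
--
-- def line_cross(l1, l2):
--     if l1[0] == l2[0]:
--         return False
--     if (l1[1]-l2[2])*(l1[1]-l2[3]) < 0 and (l2[1]-l1[2])*(l2[1]-l1[3]) < 0:
--         return True
--     else: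
--         return False
--
-- def ainbc(a, b, c):
--     return ((a-b)*(a-c))
--
-- def tmpvalid(coord1, coord2, line_border):
--     v = True
--     x1, y1 = coord1[0], coord1[1]
--     x2, y2 = coord2[0], coord2[1]
--     rlines = [linedef([x1, y1], [x2, y1]),
--               linedef([x2, y1], [x2, y2]),
--               linedef([x2, y2], [x1, y2]),
--               linedef([x1, y2], [x1, y1])]
--     for rline in rlines:
--         for bline in line_border:
--             if line_cross(rline, bline):
--                 v = False
--                 return v
--             match bline[0]:
--                 case 0:
--                     if ainbc(bline[1], x1, x2) < 0 and ainbc(bline[2], y1, y2) <= 0 and ainbc(bline[3], y1, y2) <= 0: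
--                         v = False
--                         return v
--                 case 1:
--                     if ainbc(bline[1], y1, y2) < 0 and ainbc(bline[2], x1, x2) <= 0 and ainbc(bline[3], x1, x2) <= 0:
--                         v = False
--                         return v
--     return v
-- ===== SOURCE B (Python) =====
-- def linedef(coord1, coord2):
--     xe = (coord1[0] == coord2[0])
--     ye = (coord1[1] == coord2[1])
--     if xe:
--         return [0, coord1[0], coord1[1], coord2[1]]
--     elif ye:
--         return [1, coord1[1], coord1[0], coord2[0]]
--
-- def line_cross(l1, l2):
--     if l1[0] == l2[0]:
--         return False
--     if (l1[1]-l2[2])*(l1[1]-l2[3]) < 0 and (l2[1]-l1[2])*(l2[1]-l1[3]) < 0: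
--         return True
--     else:
--         return False
--
-- def ainbc(a, b, c):
--     return ((a-b)*(a-c))
--
-- def tmpvalid(coord1, coord2, line_border):
--     # One flat pass: no rectangle sides are ever materialised.  The four
--     # side-vs-segment crossing tests collapse analytically to two conditions
--     # per border segment (vertical sides / horizontal sides of the rectangle).
--     x1, y1 = coord1[0], coord1[1]
--     x2, y2 = coord2[0], coord2[1]
--     for b in line_border:
--         t, c, a, d = b[0], b[1], b[2], b[3]
--         # containment of the segment's supporting span inside the rectangle
--         if t == 0:
--             if (c-x1)*(c-x2) < 0 and (a-y1)*(a-y2) <= 0 and (d-y1)*(d-y2) <= 0: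
--                 return False
--         elif t == 1:
--             if (c-y1)*(c-y2) < 0 and (a-x1)*(a-x2) <= 0 and (d-x1)*(d-x2) <= 0:
--                 return False
--         # crossing with a vertical rectangle side (x = x1 or x = x2)
--         if t != 0 and (c-y1)*(c-y2) < 0 and ((x1-a)*(x1-d) < 0 or (x2-a)*(x2-d) < 0):
--             return False
--         # crossing with a horizontal rectangle side (absent when x1 == x2)
--         if x1 != x2 and t != 1 and (c-x1)*(c-x2) < 0 and ((y1-a)*(y1-d) < 0 or (y2-a)*(y2-d) < 0):
--             return False
--     return True
-- ===== Notes on version B (the rewrite author's own statement) =====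
-- stated objective: alternative
-- what changed: B never builds the four rectangle sides: it replaces A's sides-x-border nested loop (linedef/line_cross per pair) with one flat pass over line_border, testing each segment against two closed-form crossing conditions (vertical/horizontal rectangle sides) plus the containment test; the result is an order-independent OR so the value is unchanged.
-- outside the precondition, e.g. on tmpvalid((3, -1), (3, 1), [[0, -2]]): A returns True, B raises IndexError
import Mathlib
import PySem

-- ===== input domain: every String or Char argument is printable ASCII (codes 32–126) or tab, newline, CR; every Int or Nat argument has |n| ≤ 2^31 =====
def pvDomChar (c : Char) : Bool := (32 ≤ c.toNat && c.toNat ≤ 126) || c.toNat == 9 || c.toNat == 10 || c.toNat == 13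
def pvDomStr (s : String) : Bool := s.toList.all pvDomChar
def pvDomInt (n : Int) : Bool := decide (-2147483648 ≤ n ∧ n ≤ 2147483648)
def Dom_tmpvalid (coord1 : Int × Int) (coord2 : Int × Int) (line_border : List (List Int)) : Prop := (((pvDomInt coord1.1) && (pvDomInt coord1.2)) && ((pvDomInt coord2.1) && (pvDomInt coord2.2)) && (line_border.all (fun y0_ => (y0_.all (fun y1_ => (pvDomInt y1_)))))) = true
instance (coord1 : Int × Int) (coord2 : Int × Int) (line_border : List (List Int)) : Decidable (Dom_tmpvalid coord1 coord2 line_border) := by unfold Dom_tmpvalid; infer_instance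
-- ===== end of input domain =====

-- B replaces A's 4-sides × border nested loop by ONE flat pass over line_border: the four
-- side/segment crossing tests are collapsed analytically into two closed-form conditions
-- per segment; same boolean result (an order-independent OR with no side effects).


-- Python l[i] for in-range i (Pre_tmpvalid keeps every access in range, so the default 0 is never read)
def pvGetI (l : List Int) (i : Nat) : Int := l.getD i 0

-- ===== PORT A =====
-- A-side helpers linedef / line_cross / ainbc, transliterated
def pvLinedef (c1 c2 : Int × Int) : Option (List Int) :=
  if c1.1 = c2.1 then some [0, c1.1, c1.2, c2.2]
  else if c1.2 = c2.2 then some [1, c1.2, c1.1, c2.1]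
  else none

def pvLineCross (l1 l2 : List Int) : Bool :=
  if pvGetI l1 0 = pvGetI l2 0 then false
  else decide ((pvGetI l1 1 - pvGetI l2 2) * (pvGetI l1 1 - pvGetI l2 3) < 0 ∧
               (pvGetI l2 1 - pvGetI l1 2) * (pvGetI l2 1 - pvGetI l1 3) < 0)

def pvAinbc (a b c : Int) : Int := (a - b) * (a - c)

-- the inline `match bline[0]` containment test of A (case 0 / case 1 / fallthrough)
def pvContainTest (x1 y1 x2 y2 : Int) (bline : List Int) : Bool :=
  let t := pvGetI bline 0
  if t = 0 then
    decide (pvAinbc (pvGetI bline 1) x1 x2 < 0 ∧ pvAinbc (pvGetI bline 2) y1 y2 ≤ 0 ∧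
            pvAinbc (pvGetI bline 3) y1 y2 ≤ 0)
  else if t = 1 then
    decide (pvAinbc (pvGetI bline 1) y1 y2 < 0 ∧ pvAinbc (pvGetI bline 2) x1 x2 ≤ 0 ∧
            pvAinbc (pvGetI bline 3) x1 x2 ≤ 0)
  else false

-- A: build the 4 rectangle sides, then for each side scan line_border; `return False`
-- on a crossing or on the containment test; `any` is the value of that early-return loop.
def tmpvalid (coord1 : Int × Int) (coord2 : Int × Int) (line_border : List (List Int)) : Bool :=
  let x1 := coord1.1; let y1 := coord1.2
  let x2 := coord2.1; let y2 := coord2.2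
  let rlines : List (List Int) :=
    [(pvLinedef (x1, y1) (x2, y1)).getD [], (pvLinedef (x2, y1) (x2, y2)).getD [],
     (pvLinedef (x2, y2) (x1, y2)).getD [], (pvLinedef (x1, y2) (x1, y1)).getD []]
  !(rlines.any (fun rline => line_border.any (fun bline =>
      pvLineCross rline bline || pvContainTest x1 y1 x2 y2 bline)))

-- ===== PORT B =====
-- B: the per-segment test a border segment must fail — containment, or the closed-form
-- crossing conditions against the vertical / horizontal rectangle sides (no sides built).
def pvSegBad (x1 y1 x2 y2 : Int) (b : List Int) : Bool :=
  let t := pvGetI b 0; let c := pvGetI b 1; let a := pvGetI b 2; let d := pvGetI b 3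
  (if t = 0 then
     decide ((c-x1)*(c-x2) < 0 ∧ (a-y1)*(a-y2) ≤ 0 ∧ (d-y1)*(d-y2) ≤ 0)
   else if t = 1 then
     decide ((c-y1)*(c-y2) < 0 ∧ (a-x1)*(a-x2) ≤ 0 ∧ (d-x1)*(d-x2) ≤ 0)
   else false) ||
  decide (t ≠ 0 ∧ (c-y1)*(c-y2) < 0 ∧ ((x1-a)*(x1-d) < 0 ∨ (x2-a)*(x2-d) < 0)) ||
  decide (x1 ≠ x2 ∧ t ≠ 1 ∧ (c-x1)*(c-x2) < 0 ∧ ((y1-a)*(y1-d) < 0 ∨ (y2-a)*(y2-d) < 0))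

def tmpvalid_alt (coord1 : Int × Int) (coord2 : Int × Int) (line_border : List (List Int)) : Bool :=
  !(line_border.any (fun b => pvSegBad coord1.1 coord1.2 coord2.1 coord2.2 b))

-- ===== PRECONDITION & SPEC =====
-- Pre_ excludes borders with a segment of fewer than 4 entries: on those A usually raises IndexError,
-- and where A's short-circuiting happens to skip the missing entries B's up-front reads still raise.
def Pre_tmpvalid (coord1 : Int × Int) (coord2 : Int × Int) (line_border : List (List Int)) : Prop :=
  ∀ bline ∈ line_border, 4 ≤ bline.length
instance (coord1 : Int × Int) (coord2 : Int × Int) (line_border : List (List Int)) : Decidable (Pre_tmpvalid coord1 coord2 line_border) := by unfold Pre_tmpvalid; infer_instance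

def pvWitness_tmpvalid : (Int × Int) × (Int × Int) × List (List Int) :=
  ((0, 0), (3, 3), [[0, 1, -1, 4], [1, 1, 0, 3]])

def Spec_tmpvalid (coord1 : Int × Int) (coord2 : Int × Int) (line_border : List (List Int)) (out : Bool) : Prop := out = tmpvalid_alt coord1 coord2 line_border
instance (coord1 : Int × Int) (coord2 : Int × Int) (line_border : List (List Int)) (out : Bool) : Decidable (Spec_tmpvalid coord1 coord2 line_border out) := by unfold Spec_tmpvalid; infer_instance

-- ===== CLAIM =====
def Claim_equal_tmpvalid : Prop := ∀ (coord1 : Int × Int) (coord2 : Int × Int) (line_border : List (List Int)), Dom_tmpvalid coord1 coord2 line_border → Pre_tmpvalid coord1 coord2 line_border → Spec_tmpvalid coord1 coord2 line_border (tmpvalid coord1 coord2 line_border)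

-- ===== LEMMAS AND PROOFS =====

-- A's inner per-segment disjunction (over the 4 concrete sides) equals B's closed form.
theorem pv_seg (x1 y1 x2 y2 : Int) (b : List Int) :
    (pvLineCross ((pvLinedef (x1, y1) (x2, y1)).getD []) b ||
     pvLineCross ((pvLinedef (x2, y1) (x2, y2)).getD []) b ||
     pvLineCross ((pvLinedef (x2, y2) (x1, y2)).getD []) b ||
     pvLineCross ((pvLinedef (x1, y2) (x1, y1)).getD []) b ||
     pvContainTest x1 y1 x2 y2 b)
      = pvSegBad x1 y1 x2 y2 b := by
  rw [Bool.eq_iff_iff]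
  by_cases hx : x1 = x2
  · subst hx
    simp [pvLinedef, pvLineCross, pvContainTest, pvSegBad, pvAinbc, pvGetI, List.getD]
    generalize b[0]?.getD 0 = t
    generalize b[1]?.getD 0 = c
    generalize b[2]?.getD 0 = a
    generalize b[3]?.getD 0 = d
    have sq : ∀ z : Int, ¬ z*z < 0 := fun z => not_lt.2 (mul_self_nonneg z)
    by_cases ht0 : t = 0 <;> by_cases ht1 : t = 1 <;>
      simp [ht0, ht1, sq, mul_comm] <;> tauto
  · have hx' : x2 ≠ x1 := Ne.symm hx
    simp [pvLinedef, pvLineCross, pvContainTest, pvSegBad, pvAinbc, pvGetI, List.getD, hx, hx']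
    generalize b[0]?.getD 0 = t
    generalize b[1]?.getD 0 = c
    generalize b[2]?.getD 0 = a
    generalize b[3]?.getD 0 = d
    by_cases ht0 : t = 0 <;> by_cases ht1 : t = 1 <;>
      simp [ht0, ht1, eq_comm] <;>
      (try exact (False.elim (by omega))) <;>
      simp only [mul_comm (c - x2) (c - x1), mul_comm (c - y2) (c - y1)] <;>
      tauto

-- swap the two `any`s of A and fold in pv_seg
theorem pv_main (x1 y1 x2 y2 : Int) (lb : List (List Int)) :
    ([(pvLinedef (x1, y1) (x2, y1)).getD [], (pvLinedef (x2, y1) (x2, y2)).getD [],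
      (pvLinedef (x2, y2) (x1, y2)).getD [], (pvLinedef (x1, y2) (x1, y1)).getD []].any
        (fun rline => lb.any (fun bline =>
          pvLineCross rline bline || pvContainTest x1 y1 x2 y2 bline)))
      = lb.any (fun b => pvSegBad x1 y1 x2 y2 b) := by
  simp only [List.any_cons, List.any_nil, Bool.or_false]
  induction lb with
  | nil => simp
  | cons b t ih =>
    simp only [List.any_cons]
    rw [← pv_seg x1 y1 x2 y2 b, ← ih]
    cases pvLineCross ((pvLinedef (x1, y1) (x2, y1)).getD []) b <;>
    cases pvLineCross ((pvLinedef (x2, y1) (x2, y2)).getD []) b <;>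
    cases pvLineCross ((pvLinedef (x2, y2) (x1, y2)).getD []) b <;>
    cases pvLineCross ((pvLinedef (x1, y2) (x1, y1)).getD []) b <;>
    cases pvContainTest x1 y1 x2 y2 b <;>
    cases t.any (fun bline => pvLineCross ((pvLinedef (x1, y1) (x2, y1)).getD []) bline || pvContainTest x1 y1 x2 y2 bline) <;>
    cases t.any (fun bline => pvLineCross ((pvLinedef (x2, y1) (x2, y2)).getD []) bline || pvContainTest x1 y1 x2 y2 bline) <;>
    cases t.any (fun bline => pvLineCross ((pvLinedef (x2, y2) (x1, y2)).getD []) bline || pvContainTest x1 y1 x2 y2 bline) <;>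
    cases t.any (fun bline => pvLineCross ((pvLinedef (x1, y2) (x1, y1)).getD []) bline || pvContainTest x1 y1 x2 y2 bline) <;>
    simp

-- ===== VERDICT =====
theorem tmpvalid_spec : Claim_equal_tmpvalid := by
  intro coord1 coord2 line_border _ _
  unfold Spec_tmpvalid tmpvalid tmpvalid_alt
  simp only [pv_main]
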